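-- pv_equiv track=rewrite | github.com/LucasLeculier/L3-1 | AtelierL3/Atelier3/exercice5.py | renverse
-- ===== SOURCE A (Python) =====
-- def ouvrante(car: str) -> bool:
--     """Return True si car = "(" ou "[" ou "{"
--
--     Args:
--         car (str): _description_
--
--     Returns:
--         bool: _description_
--     """
--
--     return car in ['(', '[', '{']
--
-- def fermante(car: str) -> bool:
--     """Return True si car = ")" ou "]" ou "}"
--
--     Args:
--         car (str): _description_
--
--     Returns:
--         bool: _description_
--     """
--
--     return car in [')', ']', '}']
--
-- def renverse(car: str) -> str:
--     """Renvoie le caractère inverse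
--
--     Args:
--         car (str): _description_
--
--     Returns:
--         str: _description_
--     """
--
--     caractère = car
--
--     lst_car = {
--         "ouvrant": ['(', '[', '{'],
--         "fermant": [')', ']', '}']
--     }
--
--     is_ouvrant = ouvrante(car)
--     is_fermant = fermante(car)
--
--     if is_ouvrant:
--
--         for i in range(0, len(lst_car.get('ouvrant'))):
--
--             if lst_car.get('ouvrant')[i] == car:
--
--                 caractère = lst_car.get('fermant')[i]
--     elif is_fermant:
--
--         for i in range(0, len(lst_car.get('fermant'))):
--
--             if lst_car.get('fermant')[i] == car:
--
--                 caractère = lst_car.get('ouvrant')[i]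
--
--     return caractère
-- ===== SOURCE B (Python) =====
-- def renverse(car: str) -> str:
--     # Closed form: '('=40 <-> ')'=41 differ in bit 0; '['=91 <-> ']'=93 and
--     # '{'=123 <-> '}'=125 differ exactly in bits 1 and 2, so XOR with 6.
--     if len(car) != 1:
--         return car
--     o = ord(car)
--     if o in (40, 41):
--         return chr(o ^ 1)
--     if o in (91, 93, 123, 125):
--         return chr(o ^ 6)
--     return car
-- ===== Notes on version B (the rewrite author's own statement) =====
-- stated objective: simpler
-- what changed: Replaces the open/close classification and two index-scanning loops over parallel bracket lists with closed-form character-code arithmetic: the mirror bracket is the code XOR 1 for round parentheses and XOR 6 for square and curly brackets, everything else is returned unchanged.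
import Mathlib
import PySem

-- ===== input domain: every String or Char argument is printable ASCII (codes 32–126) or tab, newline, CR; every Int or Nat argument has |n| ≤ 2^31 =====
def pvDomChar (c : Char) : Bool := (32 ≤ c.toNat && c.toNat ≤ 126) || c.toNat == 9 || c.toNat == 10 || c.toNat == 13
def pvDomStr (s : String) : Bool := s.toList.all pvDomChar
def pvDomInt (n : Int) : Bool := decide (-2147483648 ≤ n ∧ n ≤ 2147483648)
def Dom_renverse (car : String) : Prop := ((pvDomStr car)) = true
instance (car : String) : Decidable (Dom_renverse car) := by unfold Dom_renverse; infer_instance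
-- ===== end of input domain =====

-- B replaces the bracket-list scans with closed-form character-code arithmetic (mirror = code XOR 1 or XOR 6); objective: simpler.


-- ===== PORT A =====
def ouvrante (car : String) : Bool := decide (car ∈ ["(", "[", "{"])

def fermante (car : String) : Bool := decide (car ∈ [")", "]", "}"])

def renverse (car : String) : String :=
  let caractère := car
  let lst_ouvrant : List String := ["(", "[", "{"]
  let lst_fermant : List String := [")", "]", "}"]
  let is_ouvrant := ouvrante car
  let is_fermant := fermante car
  if is_ouvrant then
    (PySem.List.pyRange 0 lst_ouvrant.length 1).foldl
      (fun acc i =>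
        if PySem.List.pyGet? lst_ouvrant i = some car then
          -- index i is always in range here, so getD acc is exact (no IndexError)
          (PySem.List.pyGet? lst_fermant i).getD acc
        else acc) caractère
  else if is_fermant then
    (PySem.List.pyRange 0 lst_fermant.length 1).foldl
      (fun acc i =>
        if PySem.List.pyGet? lst_fermant i = some car then
          (PySem.List.pyGet? lst_ouvrant i).getD acc
        else acc) caractère
  else caractère

-- ===== PORT B =====
-- ord/chr on a one-character string: exact, the codes involved are valid scalar values
def renverse_alt (car : String) : String :=
  match car.toList with
  | [c] =>
    let o := c.toNat
    if o = 40 ∨ o = 41 then String.ofList [Char.ofNat (o ^^^ 1)]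
    else if o = 91 ∨ o = 93 ∨ o = 123 ∨ o = 125 then String.ofList [Char.ofNat (o ^^^ 6)]
    else car
  | _ => car

-- ===== PRECONDITION & SPEC =====
def Spec_renverse (car : String) (out : String) : Prop := out = renverse_alt car
instance (car : String) (out : String) : Decidable (Spec_renverse car out) := by unfold Spec_renverse; infer_instance

-- ===== CLAIM (what is proved, stated in full; the proofs are below) =====
def Claim_equal_renverse : Prop := ∀ (car : String), Dom_renverse car → Spec_renverse car (renverse car)

-- ===== LEMMAS AND PROOFS =====
theorem char_of_toNat (c : Char) (d : Char) (g : c.toNat = d.toNat) : c = d := by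
  apply Char.ext; apply UInt32.toNat_inj.mp; exact g

-- ===== VERDICT (by name: the statement is the Claim_ definition above) =====
theorem renverse_spec : Claim_equal_renverse := by
  intro car _
  unfold Spec_renverse
  by_cases h1 : car = "(" ; · subst h1; decide
  by_cases h2 : car = "[" ; · subst h2; decide
  by_cases h3 : car = "{" ; · subst h3; decide
  by_cases h4 : car = ")" ; · subst h4; decide
  by_cases h5 : car = "]" ; · subst h5; decide
  by_cases h6 : car = "}" ; · subst h6; decide
  -- car is none of the six brackets: both sides return car
  have hA : renverse car = car := by
    simp [renverse, ouvrante, fermante, h1, h2, h3, h4, h5, h6]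
  have hB : renverse_alt car = car := by
    unfold renverse_alt
    cases hl : car.toList with
    | nil => simp
    | cons c rest =>
      cases rest with
      | cons d rest' => simp
      | nil =>
        have hcar : car = String.ofList [c] := by rw [← hl, String.ofList_toList]
        simp only []
        split_ifs with g1 g2
        · rcases g1 with g | g
          · exact absurd (by rw [hcar]; exact congrArg (fun x => String.ofList [x]) (char_of_toNat c '(' g)) h1
          · exact absurd (by rw [hcar]; exact congrArg (fun x => String.ofList [x]) (char_of_toNat c ')' g)) h4
        · rcases g2 with g | g | g | g
          · exact absurd (by rw [hcar]; exact congrArg (fun x => String.ofList [x]) (char_of_toNat c '[' g)) h2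
          · exact absurd (by rw [hcar]; exact congrArg (fun x => String.ofList [x]) (char_of_toNat c ']' g)) h5
          · exact absurd (by rw [hcar]; exact congrArg (fun x => String.ofList [x]) (char_of_toNat c '{' g)) h3
          · exact absurd (by rw [hcar]; exact congrArg (fun x => String.ofList [x]) (char_of_toNat c '}' g)) h6
        · rfl
  rw [hA, hB]
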